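-- pv_equiv track=rewrite | github.com/raf-andrew/Legal_Study | sniffing/git/git_integration.py | _get_commit_type
-- ===== SOURCE A (Python) =====
-- def _get_commit_type(message: str) -> str:
--     """Get commit type from message."""
--     types = {
--         "feat": "feature",
--         "fix": "bugfix",
--         "docs": "documentation",
--         "style": "style",
--         "refactor": "refactor",
--         "test": "test",
--         "chore": "chore"
--     }
--
--     # Check conventional commit format
--     first_line = message.split("\n")[0]
--     for prefix, commit_type in types.items():
--         if first_line.startswith(f"{prefix}:"):
--             return commit_type
--
--     return "other"
-- ===== SOURCE B (Python) =====
-- def _get_commit_type(message: str) -> str: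
--     """Get commit type from message."""
--     # One character walk: collect the chars before the first ':' on the first
--     # line; a newline or end of string before any ':' means no conventional
--     # prefix.  Then classify the collected prefix with a plain if-chain.
--     prefix_chars = []
--     for ch in message:
--         if ch == "\n":
--             return "other"
--         if ch == ":":
--             break
--         prefix_chars.append(ch)
--     else:
--         return "other"
--     p = "".join(prefix_chars)
--     if p == "feat":
--         return "feature"
--     if p == "fix":
--         return "bugfix"
--     if p == "docs":
--         return "documentation"
--     if p == "style":
--         return "style"
--     if p == "refactor":
--         return "refactor"
--     if p == "test":
--         return "test"
--     if p == "chore":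
--         return "chore"
--     return "other"
-- ===== Notes on version B (the rewrite author's own statement) =====
-- stated objective: alternative
-- what changed: Replaces splitting off the first line and scanning the prefix table with startswith tests by a single character walk that collects the chars before the first colon (stopping at newline/end) and classifies them with a plain if-chain, with no dict and no split; it trades the table scan for one pass and explicit branching.
import Mathlib
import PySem

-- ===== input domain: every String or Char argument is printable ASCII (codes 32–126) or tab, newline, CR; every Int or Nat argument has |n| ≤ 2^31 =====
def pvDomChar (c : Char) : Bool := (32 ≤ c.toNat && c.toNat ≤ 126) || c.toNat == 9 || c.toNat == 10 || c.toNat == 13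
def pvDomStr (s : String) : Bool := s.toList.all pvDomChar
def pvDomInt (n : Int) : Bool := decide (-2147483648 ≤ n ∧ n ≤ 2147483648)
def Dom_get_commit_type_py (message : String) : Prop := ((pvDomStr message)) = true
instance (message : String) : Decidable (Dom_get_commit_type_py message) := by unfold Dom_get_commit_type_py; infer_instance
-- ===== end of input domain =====

-- B replaces A's split-into-lines plus scan over a prefix table by one character walk
-- collecting the chars before the first colon (stopping at newline or end) and a plain if-chain (objective: alternative; return value only, no side effects).

-- ===== PORT A =====
def typesA : PySem.Dict String String := PySem.Dict.mk
  [("feat", "feature"), ("fix", "bugfix"), ("docs", "documentation"), ("style", "style"),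
   ("refactor", "refactor"), ("test", "test"), ("chore", "chore")]

-- the for-loop over types.items() with early return
def goA : List (String × String) → String → String
  | [], _ => "other"
  | (prefx, ctype) :: rest, firstLine =>
    if PySem.Str.startswith firstLine (prefx ++ ":") then ctype else goA rest firstLine

def get_commit_type_py (message : String) : String :=
  -- message.split("\n")[0]: split? with a nonempty sep always returns a nonempty list, so [0] is its head
  let firstLine := ((PySem.Str.split? message "\n").getD []).headD ""
  goA typesA.items firstLine

-- ===== PORT B =====
-- the for-loop over the characters of message with early returns:
-- none = returned "other" inside the loop ('\n' seen, or the string ended, before any ':');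
-- some pre = broke at ':' with prefix_chars = pre
def scanPrefix : List Char → Option (List Char)
  | [] => none
  | c :: rest =>
    if c = '\n' then none
    else if c = ':' then some []
    else (scanPrefix rest).map (c :: ·)

-- the if-chain classifying the collected prefix
def mapPrefix (p : String) : String :=
  if p = "feat" then "feature"
  else if p = "fix" then "bugfix"
  else if p = "docs" then "documentation"
  else if p = "style" then "style"
  else if p = "refactor" then "refactor"
  else if p = "test" then "test"
  else if p = "chore" then "chore"
  else "other"

def get_commit_type_py_alt (message : String) : String :=
  match scanPrefix message.toList with
  | none => "other"
  | some pre => mapPrefix (String.ofList pre)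

-- ===== PRECONDITION & SPEC =====
def Spec_get_commit_type_py (message : String) (out : String) : Prop := out = get_commit_type_py_alt message
instance (message : String) (out : String) : Decidable (Spec_get_commit_type_py message out) := by unfold Spec_get_commit_type_py; infer_instance

-- ===== CLAIM (what is proved, stated in full; the proofs are below) =====
def Claim_equal_get_commit_type_py : Prop := ∀ (message : String), Dom_get_commit_type_py message → Spec_get_commit_type_py message (get_commit_type_py message)

-- ===== LEMMAS AND PROOFS =====

-- the part of the first line before the first ':' (none if no ':' before the end)
def partColon : List Char → Option (List Char)
  | [] => none
  | c :: rest => if c = ':' then some [] else (partColon rest).map (c :: ·)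

-- startswith (p ++ ":") succeeds exactly when the part before the first ':' is p (for a colon-free p)
theorem startswith_colon (p : List Char) (hp : ':' ∉ p) :
    ∀ cs : List Char, (PySem.Chars.startswith cs (p ++ [':']) = true ↔ partColon cs = some p) := by
  induction p with
  | nil =>
    intro cs
    cases cs with
    | nil => simp [PySem.Chars.startswith_iff, partColon]
    | cons c rest =>
      simp only [PySem.Chars.startswith_iff, List.nil_append, partColon]
      constructor
      · intro h
        rcases (List.cons_prefix_cons.mp h) with ⟨hc, _⟩
        simp [← hc]
      · intro h
        split at h
        · next hc => subst hc; exact List.cons_prefix_cons.mpr ⟨rfl, List.nil_prefix⟩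
        · simp at h
  | cons a p' ih =>
    have ha : a ≠ ':' := fun h => hp (h ▸ List.mem_cons_self)
    have hp' : ':' ∉ p' := fun h => hp (List.mem_cons_of_mem _ h)
    intro cs
    cases cs with
    | nil => simp [PySem.Chars.startswith_iff, partColon]
    | cons c rest =>
      simp only [PySem.Chars.startswith_iff, List.cons_append, List.cons_prefix_cons, partColon]
      rw [← PySem.Chars.startswith_iff]
      by_cases hc : c = ':'
      · subst hc
        constructor
        · rintro ⟨h1, _⟩; exact absurd h1 ha
        · intro h; simp at h
      · simp only [if_neg hc, Option.map_eq_some_iff]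
        constructor
        · rintro ⟨h1, h2⟩
          exact ⟨p', (ih hp' rest).mp h2, by rw [h1]⟩
        · rintro ⟨q, hq, hcons⟩
          have h1 : c = a := ((List.cons.injEq c q a p').mp hcons).1
          have h2 : q = p' := ((List.cons.injEq c q a p').mp hcons).2
          exact ⟨h1.symm, (ih hp' rest).mpr (h2 ▸ hq)⟩

-- A's scan over an assoc list with colon-free keys equals partition-then-lookup
theorem goA_items (items : List (String × String)) (fl : String)
    (h : ∀ pt ∈ items, ':' ∉ pt.1.toList) :
    goA items fl =
      (match partColon fl.toList with
       | none => "other"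
       | some pre => (((PySem.Dict.mk items).get? (String.ofList pre)).getD "other")) := by
  induction items with
  | nil =>
    cases hpc : partColon fl.toList with
    | none => simp [goA]
    | some pre => simp [goA, PySem.Dict.get?]
  | cons pt rest ih =>
    obtain ⟨p, t⟩ := pt
    have hkey : ':' ∉ p.toList := h (p, t) List.mem_cons_self
    have hrest : ∀ pt ∈ rest, ':' ∉ pt.1.toList := fun pt hm => h pt (List.mem_cons_of_mem _ hm)
    have hsw : PySem.Str.startswith fl (p ++ ":") =
        PySem.Chars.startswith fl.toList (p.toList ++ [':']) := by
      simp [PySem.Str.startswith_eq]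
    cases hpc : partColon fl.toList with
    | none =>
      have hfalse : PySem.Chars.startswith fl.toList (p.toList ++ [':']) = false := by
        by_contra hne
        have := (startswith_colon p.toList hkey fl.toList).mp (by
          cases hb : PySem.Chars.startswith fl.toList (p.toList ++ [':']) with
          | true => rfl
          | false => exact absurd hb hne)
        simp [hpc] at this
      simp only [goA, hsw, hfalse, if_false, Bool.false_eq_true]
      rw [ih hrest]
      simp [hpc]
    | some pre =>
      by_cases hpre : pre = p.toList
      · subst hpre
        have htrue : PySem.Chars.startswith fl.toList (p.toList ++ [':']) = true :=
          (startswith_colon p.toList hkey fl.toList).mpr hpc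
        simp only [goA, hsw, htrue, if_true]
        simp [PySem.Dict.get?_mk_cons]
      · have hfalse : PySem.Chars.startswith fl.toList (p.toList ++ [':']) = false := by
          by_contra hne
          have := (startswith_colon p.toList hkey fl.toList).mp (by
            cases hb : PySem.Chars.startswith fl.toList (p.toList ++ [':']) with
            | true => rfl
            | false => exact absurd hb hne)
          rw [hpc] at this
          exact hpre (Option.some.injEq _ _ ▸ this)
        have hne' : (p == String.ofList pre) = false := by
          simp only [beq_eq_false_iff_ne, ne_eq]
          intro hEq
          apply hpre
          rw [hEq]
          simp
        simp only [goA, hsw, hfalse, if_false, Bool.false_eq_true]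
        rw [ih hrest]
        simp [hpc, PySem.Dict.get?_mk_cons, hne']

-- the accumulator of splitOn.go is a reversed prefix of the result
theorem splitOn_go_acc (sep : List Char) : ∀ (fuel : Nat) (cs cur : List Char) (acc : List (List Char)),
    PySem.Chars.splitOn.go sep fuel cs cur acc = acc.reverse ++ PySem.Chars.splitOn.go sep fuel cs cur [] := by
  intro fuel
  induction fuel with
  | zero => intro cs cur acc; simp [PySem.Chars.splitOn.go]
  | succ f ih =>
    intro cs cur acc
    cases cs with
    | nil => simp [PySem.Chars.splitOn.go]
    | cons c rest =>
      simp only [PySem.Chars.splitOn.go]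
      by_cases hp : sep.isPrefixOf (c :: rest) = true
      · simp only [hp, if_true]
        rw [ih _ [] (cur.reverse :: acc), ih _ [] ([cur.reverse])]
        simp
      · simp only [hp, Bool.false_eq_true, if_false]
        exact ih rest (c :: cur) acc

-- with enough fuel, the first chunk of splitOn by '\n' is the text before the first '\n'
theorem splitOn_go_head : ∀ (cs : List Char) (fuel : Nat) (cur : List Char), cs.length < fuel →
    (PySem.Chars.splitOn.go ['\n'] fuel cs cur []).headD [] = cur.reverse ++ cs.takeWhile (· ≠ '\n') := by
  intro cs
  induction cs with
  | nil =>
    intro fuel cur h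
    cases fuel with
    | zero => omega
    | succ f => simp [PySem.Chars.splitOn.go]
  | cons c rest ih =>
    intro fuel cur h
    cases fuel with
    | zero => omega
    | succ f =>
      simp only [PySem.Chars.splitOn.go]
      by_cases hc : c = '\n'
      · subst hc
        have hp : List.isPrefixOf ['\n'] ('\n' :: rest) = true := by simp [List.isPrefixOf]
        simp only [hp, if_true]
        rw [splitOn_go_acc]
        simp [List.takeWhile]
      · have hp : List.isPrefixOf ['\n'] (c :: rest) = false := by
          simp [List.isPrefixOf]; exact fun h' => absurd h'.symm hc
        simp only [hp, Bool.false_eq_true, if_false]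
        rw [ih f (c :: cur) (by simpa using Nat.lt_of_succ_lt_succ h)]
        simp [List.takeWhile, hc]

theorem headD_map_ofList (L : List (List Char)) :
    ((L.map String.ofList).headD "").toList = L.headD [] := by
  cases L <;> simp

-- message.split("\n")[0] is the text before the first '\n'
theorem firstLine_toList (message : String) :
    (((PySem.Str.split? message "\n").getD []).headD "").toList
      = message.toList.takeWhile (· ≠ '\n') := by
  have hsep : ("\n" : String).toList = ['\n'] := by decide
  simp only [PySem.Str.split?, hsep, PySem.Chars.split?, List.isEmpty]
  simp only [Bool.false_eq_true, if_false, Option.map_some, Option.getD_some, PySem.Chars.splitOn]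
  rw [headD_map_ofList]
  simpa using splitOn_go_head message.toList (message.toList.length + 1) [] (Nat.lt_succ_self _)

-- B's single walk computes the partition of the first line
theorem scanPrefix_eq (cs : List Char) :
    scanPrefix cs = partColon (cs.takeWhile (· ≠ '\n')) := by
  induction cs with
  | nil => simp [scanPrefix, partColon]
  | cons c rest ih =>
    by_cases hn : c = '\n'
    · subst hn; simp [scanPrefix, partColon, List.takeWhile]
    · by_cases hc : c = ':'
      · subst hc; simp [scanPrefix, partColon, List.takeWhile]
      · simp [scanPrefix, partColon, List.takeWhile, hn, hc, ih]

-- B's if-chain is A's table lookup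
theorem mapPrefix_eq (s : String) : mapPrefix s = (typesA.get? s).getD "other" := by
  unfold mapPrefix
  split_ifs with h1 h2 h3 h4 h5 h6 h7
  · subst h1; rfl
  · subst h2; rfl
  · subst h3; rfl
  · subst h4; rfl
  · subst h5; rfl
  · subst h6; rfl
  · subst h7; rfl
  · have hb : ∀ k : String, ¬ s = k → (k == s) = false := fun k hk =>
      beq_eq_false_iff_ne.mpr (fun h => hk h.symm)
    have hnone : typesA.get? s = none := by
      rw [typesA]
      simp only [PySem.Dict.get?_mk_cons, hb _ h1, hb _ h2, hb _ h3, hb _ h4, hb _ h5, hb _ h6,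
        hb _ h7, Bool.false_eq_true, if_false]
      rfl
    rw [hnone]; rfl

-- ===== VERDICT (by name: the statement is the Claim_ definition above) =====
theorem get_commit_type_py_spec : Claim_equal_get_commit_type_py := by
  intro message _
  unfold Spec_get_commit_type_py get_commit_type_py get_commit_type_py_alt
  rw [goA_items typesA.items (((PySem.Str.split? message "\n").getD []).headD "") (by decide)]
  rw [scanPrefix_eq, ← firstLine_toList]
  cases hpc : partColon ((((PySem.Str.split? message "\n").getD []).headD "") : String).toList with
  | none => rfl
  | some pre => simp [mapPrefix_eq]
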